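-- pv_equiv track=rewrite | github.com/HeavenzFire/-JUDGEMENT-DAY- | family_safety_coordinator.py | _aggregate_child_indicators
-- ===== SOURCE A (Python) =====
-- from typing import Dict, List, Optional
--
-- def _aggregate_child_indicators(children: List[Dict]) -> Dict:
--     """Aggregate child safety indicators across all children"""
--     aggregated = {}
--
--     for child in children:
--         indicators = child.get("indicators", {})
--         for key, value in indicators.items():
--             if key not in aggregated:
--                 aggregated[key] = False
--             if value:
--                 aggregated[key] = True
--
--     return aggregated
-- ===== SOURCE B (Python) =====
-- def _aggregate_child_indicators(children):
--     """Aggregate child safety indicators across all children."""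
--     keys = {}
--     for child in children:
--         keys.update(child.get("indicators", {}))
--     return {k: any(bool(child.get("indicators", {}).get(k)) for child in children)
--             for k in keys}
-- ===== Notes on version B (the rewrite author's own statement) =====
-- stated objective: alternative
-- what changed: A builds the result in one interleaved pass, inserting False and overwriting to True per pair; B first collects the key order across all children and then computes each key's value independently as any() over a per-key scan of the children.
import Mathlib
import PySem

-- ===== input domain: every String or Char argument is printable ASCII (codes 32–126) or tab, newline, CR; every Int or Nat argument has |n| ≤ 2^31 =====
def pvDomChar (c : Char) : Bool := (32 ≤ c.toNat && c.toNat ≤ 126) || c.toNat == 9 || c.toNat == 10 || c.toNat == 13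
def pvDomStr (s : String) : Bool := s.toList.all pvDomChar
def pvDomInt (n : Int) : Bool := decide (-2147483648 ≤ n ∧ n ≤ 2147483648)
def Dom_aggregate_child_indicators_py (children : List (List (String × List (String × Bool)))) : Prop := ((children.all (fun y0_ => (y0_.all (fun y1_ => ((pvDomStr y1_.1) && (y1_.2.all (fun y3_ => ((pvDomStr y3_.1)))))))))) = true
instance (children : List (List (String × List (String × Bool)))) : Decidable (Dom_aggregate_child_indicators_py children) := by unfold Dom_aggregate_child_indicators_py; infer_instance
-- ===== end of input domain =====

-- B replaces A's interleaved insert/overwrite accumulation by two phases — collect the key order, then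
-- compute each key's OR with a per-key scan over the children (objective: alternative decomposition, not faster).

-- ===== PORT A =====
def aggregate_child_indicators_py (children : List (List (String × List (String × Bool)))) : List (String × Bool) :=
  (children.foldl (fun aggregated child =>
      let indicators := (PySem.Dict.mk child).getD "indicators" []
      indicators.foldl (fun aggregated kv =>
        let aggregated := if aggregated.contains kv.1 then aggregated else aggregated.insert kv.1 false
        if kv.2 then aggregated.insert kv.1 true else aggregated)
        aggregated)
    (PySem.Dict.empty : PySem.Dict String Bool)).items

-- ===== PORT B =====
def aggregate_child_indicators_py_alt (children : List (List (String × List (String × Bool)))) : List (String × Bool) :=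
  let keys : PySem.Dict String Bool :=
    children.foldl (fun keys child => keys.update ((PySem.Dict.mk child).getD "indicators" [])) PySem.Dict.empty
  keys.keys.map (fun k =>
    (k, children.any (fun child => (PySem.Dict.mk ((PySem.Dict.mk child).getD "indicators" [])).getD k false)))

-- ===== PRECONDITION & SPEC =====
-- Pre_ requires every inner "indicators" association list to carry distinct keys: such lists encode
-- Python dicts, which cannot hold a duplicate key, so duplicate-key lists correspond to no Python input.
def Pre_aggregate_child_indicators_py (children : List (List (String × List (String × Bool)))) : Prop :=
  ∀ child ∈ children, ∀ p ∈ child, (p.2.map Prod.fst).Nodup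
instance (children : List (List (String × List (String × Bool)))) : Decidable (Pre_aggregate_child_indicators_py children) := by unfold Pre_aggregate_child_indicators_py; infer_instance
def pvWitness_aggregate_child_indicators_py : (List (List (String × List (String × Bool)))) :=
  ([[("indicators", [("sad", true), ("ok", false)])], [("indicators", [("ok", true)])], [("note", [])]])
def Spec_aggregate_child_indicators_py (children : List (List (String × List (String × Bool)))) (out : List (String × Bool)) : Prop := out = aggregate_child_indicators_py_alt children
instance (children : List (List (String × List (String × Bool)))) (out : List (String × Bool)) : Decidable (Spec_aggregate_child_indicators_py children out) := by unfold Spec_aggregate_child_indicators_py; infer_instance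

-- ===== CLAIM (what is proved, stated in full; the proofs are below) =====
def Claim_equal_aggregate_child_indicators_py : Prop := ∀ (children : List (List (String × List (String × Bool)))), Dom_aggregate_child_indicators_py children → Pre_aggregate_child_indicators_py children → Spec_aggregate_child_indicators_py children (aggregate_child_indicators_py children)

-- ===== LEMMAS AND PROOFS =====

-- helper names for the ports' inline lambdas (definitionally equal to the port bodies)
def pvInd (child : List (String × List (String × Bool))) : List (String × Bool) :=
  (PySem.Dict.mk child).getD "indicators" []

def pvInner (aggregated : PySem.Dict String Bool) (kv : String × Bool) : PySem.Dict String Bool :=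
  let aggregated := if aggregated.contains kv.1 then aggregated else aggregated.insert kv.1 false
  if kv.2 then aggregated.insert kv.1 true else aggregated

def pvStepA (aggregated : PySem.Dict String Bool) (child : List (String × List (String × Bool))) : PySem.Dict String Bool :=
  (pvInd child).foldl pvInner aggregated

lemma pvInner_getD_step (d : PySem.Dict String Bool) (p : String × Bool) (k : String) :
    (pvInner d p).getD k false = (d.getD k false || (p.1 == k && p.2)) := by
  obtain ⟨k0, v0⟩ := p
  show (if v0 then (if d.contains k0 then d else d.insert k0 false).insert k0 true
        else if d.contains k0 then d else d.insert k0 false).getD k false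
      = (d.getD k false || (k0 == k && v0))
  by_cases hk : k = k0
  · subst hk
    cases v0 with
    | false =>
      by_cases hc : d.contains k = true
      · simp [hc]
      · have hcf : d.contains k = false := by simpa using hc
        simp [hcf, PySem.Dict.getD_of_not_contains d false hcf]
    | true =>
      by_cases hc : d.contains k = true <;> simp [hc]
  · have hkb : (k0 == k) = false := by
      simp only [beq_eq_false_iff_ne]
      exact fun h => hk h.symm
    cases v0 with
    | false =>
      by_cases hc : d.contains k0 = true
      · simp [hc, hkb]
      · have hcf : d.contains k0 = false := by simpa using hc
        simp [hcf, PySem.Dict.getD_insert, hk, hkb]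
    | true =>
      by_cases hc : d.contains k0 = true <;>
        simp [hc, PySem.Dict.getD_insert, hk, hkb]

lemma pvInner_getD (l : List (String × Bool)) (d : PySem.Dict String Bool) (k : String) :
    (l.foldl pvInner d).getD k false = (d.getD k false || l.any (fun p => p.1 == k && p.2)) := by
  induction l generalizing d with
  | nil => simp
  | cons p t ih => simp [List.foldl_cons, ih, pvInner_getD_step, Bool.or_assoc]

lemma pvInner_keys_step (d : PySem.Dict String Bool) (p : String × Bool) :
    (pvInner d p).keys = PySem.Set.add d.keys p.1 := by
  unfold pvInner
  by_cases hc : d.contains p.1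
  · have hm : p.1 ∈ d.keys := (PySem.Dict.contains_iff_mem_keys d p.1).mp hc
    by_cases hv : p.2 <;>
      simp [hc, hv, PySem.Dict.keys_insert_of_contains d _ hc, PySem.Set.add_of_mem hm]
  · have hm : p.1 ∉ d.keys := fun h => hc ((PySem.Dict.contains_iff_mem_keys d p.1).mpr h)
    by_cases hv : p.2 <;>
      simp [hc, hv, PySem.Dict.keys_insert_of_not_contains d _ (by simpa using hc),
        PySem.Dict.keys_insert_of_contains _ _ (PySem.Dict.contains_insert_self d p.1 false),
        PySem.Set.add_of_not_mem hm]

lemma pvInner_keys (l : List (String × Bool)) (d : PySem.Dict String Bool) :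
    (l.foldl pvInner d).keys = PySem.Set.update d.keys (l.map Prod.fst) := by
  induction l generalizing d with
  | nil => simp [PySem.Set.update]
  | cons p t ih => simp [List.foldl_cons, ih, pvInner_keys_step, PySem.Set.update]

lemma pvA_getD (cs : List (List (String × List (String × Bool)))) (d : PySem.Dict String Bool) (k : String) :
    (cs.foldl pvStepA d).getD k false
      = (d.getD k false || cs.any (fun c => (pvInd c).any (fun p => p.1 == k && p.2))) := by
  induction cs generalizing d with
  | nil => simp
  | cons c t ih => simp [List.foldl_cons, ih, pvStepA, pvInner_getD, Bool.or_assoc]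

lemma pvA_keys (cs : List (List (String × List (String × Bool)))) (d : PySem.Dict String Bool) :
    (cs.foldl pvStepA d).keys
      = cs.foldl (fun ks c => PySem.Set.update ks ((pvInd c).map Prod.fst)) d.keys := by
  induction cs generalizing d with
  | nil => rfl
  | cons c t ih => simp [List.foldl_cons, ih, pvStepA, pvInner_keys]

lemma pvB_keys (cs : List (List (String × List (String × Bool)))) (d : PySem.Dict String Bool) :
    (cs.foldl (fun ks c => ks.update (pvInd c)) d).keys
      = cs.foldl (fun ks c => PySem.Set.update ks ((pvInd c).map Prod.fst)) d.keys := by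
  induction cs generalizing d with
  | nil => rfl
  | cons c t ih =>
    simp only [List.foldl_cons, ih]
    congr 1
    exact PySem.Dict.keys_foldl_insert_key (pvInd c) Prod.fst (fun _ p => p.2) d

lemma pvKeys_nodup (cs : List (List (String × List (String × Bool)))) (s : PySem.Set String)
    (h : s.Nodup) :
    (cs.foldl (fun ks c => PySem.Set.update ks ((pvInd c).map Prod.fst)) s).Nodup := by
  induction cs generalizing s with
  | nil => exact h
  | cons c t ih => exact ih _ (PySem.Set.nodup_update _ _ h)

lemma pvAny_eq_false_of_not_mem (t : List (String × Bool)) (k : String) (h : k ∉ t.map Prod.fst) :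
    t.any (fun p => p.1 == k && p.2) = false := by
  simp only [List.any_eq_false]
  rintro ⟨k', v⟩ hm
  have : k' ≠ k := fun he => h (he ▸ List.mem_map_of_mem hm)
  simp [this]

lemma pvMk_getD_eq_any (m : List (String × Bool)) (h : (m.map Prod.fst).Nodup) (k : String) :
    (PySem.Dict.mk m).getD k false = m.any (fun p => p.1 == k && p.2) := by
  induction m with
  | nil => rfl
  | cons p t ih =>
    obtain ⟨k0, v0⟩ := p
    simp only [List.map_cons, List.nodup_cons] at h
    rw [PySem.Dict.getD_eq_get?_getD, PySem.Dict.get?_mk_cons]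
    by_cases hk : k0 = k
    · subst hk
      simp [pvAny_eq_false_of_not_mem t k0 h.1]
    · simp [hk, ← PySem.Dict.getD_eq_get?_getD, ih h.2]

lemma pvInd_nodup (children : List (List (String × List (String × Bool))))
    (hpre : Pre_aggregate_child_indicators_py children) (c : List (String × List (String × Bool)))
    (hc : c ∈ children) : ((pvInd c).map Prod.fst).Nodup := by
  unfold pvInd
  rw [PySem.Dict.getD_eq_get?_getD]
  cases hg : (PySem.Dict.mk c).get? "indicators" with
  | none => simp
  | some v =>
    have hmem : ("indicators", v) ∈ c := PySem.Dict.mem_items_of_get?_eq_some _ hg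
    simpa using hpre c hc _ hmem

-- ===== VERDICT (by name: the statement is the Claim_ definition above) =====
theorem aggregate_child_indicators_py_spec : Claim_equal_aggregate_child_indicators_py := by
  intro children _ hpre
  show aggregate_child_indicators_py children = aggregate_child_indicators_py_alt children
  have hA : aggregate_child_indicators_py children = (children.foldl pvStepA PySem.Dict.empty).items := rfl
  have hB : aggregate_child_indicators_py_alt children
      = (children.foldl (fun ks c => ks.update (pvInd c)) PySem.Dict.empty).keys.map
          (fun k => (k, children.any (fun c => (PySem.Dict.mk (pvInd c)).getD k false))) := rfl
  have hnd : (children.foldl pvStepA PySem.Dict.empty).keys.Nodup := by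
    rw [pvA_keys]
    exact pvKeys_nodup children _ (by simp)
  rw [hA, hB, PySem.Dict.items_eq_map_keys _ hnd false, pvA_keys, pvB_keys]
  apply List.map_congr_left
  intro k _
  rw [pvA_getD]
  simp only [PySem.Dict.getD_empty, Bool.false_or]
  exact congrArg (Prod.mk k) (PySem.List.any_congr_mem (fun c hc => (pvMk_getD_eq_any _ (pvInd_nodup children hpre c hc) k).symm))
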